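-- pv_equiv track=rewrite | github.com/Shunsuke-Torus/RSA_Variable | utils_insert.py | int_to_char
-- ===== SOURCE A (Python) =====
-- def int_to_char(P_C_int: int) ->chr: #数字から文字 N=95
--     #ユークリッドの互除法　数字を割って最小正剰余で表示
--     qlist = []#商の保存先 quotient
--     rlist = []#余り remainder
--     while(P_C_int>=95):
--         q,r = divmod(P_C_int,95)
--         #q = P_C_int // 95
--         #r = P_C_int % 95
--         qlist.append(q)#商と余りを式の番号ごとに保存
--         rlist.append(r)
--         P_C_int = q
--     if P_C_int // 95 < 95:
--         r = P_C_int % 95#point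
--         rlist.append(r)
--
--     rlist.reverse()#反転して1の位から入れる。
--
--     char_list = []#数字を文字にする
--     for i in range (0,len(rlist)):
--         char_list.append(chr(rlist[i]+32))#+32で元の文字に戻す。特殊文字を避けるため
--     P_C_char = "".join(char_list)#"",""を結合する
--
--     return P_C_char
-- ===== SOURCE B (Python) =====
-- def int_to_char(P_C_int: int) -> str:
--     # recursion on the quotient: most-significant digit first, no lists/reverse
--     if P_C_int < 95:
--         return chr(P_C_int % 95 + 32)
--     return int_to_char(P_C_int // 95) + chr(P_C_int % 95 + 32)
-- ===== Notes on version B (the rewrite author's own statement) =====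
-- stated objective: simpler
-- what changed: Replaces A's while-loop collecting remainders into a list (plus a dead qlist and an always-true guard), reversing, mapping to chars and joining, by direct recursion on the quotient that emits digits most-significant-first with string concatenation.
import Mathlib
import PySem

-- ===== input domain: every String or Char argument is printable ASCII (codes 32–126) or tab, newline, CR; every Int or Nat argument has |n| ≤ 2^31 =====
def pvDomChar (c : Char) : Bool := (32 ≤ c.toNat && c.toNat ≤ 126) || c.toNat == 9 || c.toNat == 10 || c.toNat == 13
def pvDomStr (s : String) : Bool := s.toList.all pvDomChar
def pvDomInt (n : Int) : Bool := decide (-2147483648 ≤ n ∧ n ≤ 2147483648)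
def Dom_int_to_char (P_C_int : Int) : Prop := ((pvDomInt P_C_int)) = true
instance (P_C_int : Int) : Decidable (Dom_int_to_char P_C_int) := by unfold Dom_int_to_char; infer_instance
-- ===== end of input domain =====

-- B replaces A's while-loop + remainder list + reverse + join by direct recursion on the
-- quotient, emitting digits most-significant first (objective: simpler).

-- ===== PORT A =====
-- the while loop, state (P_C_int, qlist, rlist)
def intToCharLoopA (n : Int) (qlist rlist : List Int) : Int × List Int × List Int :=
  if h : n ≥ 95 then
    intToCharLoopA (PySem.Int.floordiv n 95)
      (qlist ++ [PySem.Int.floordiv n 95]) (rlist ++ [PySem.Int.mod n 95])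
  else (n, qlist, rlist)
termination_by n.toNat
decreasing_by
  have h1 : PySem.Int.floordiv n 95 = n / 95 := PySem.Int.floordiv_eq_ediv_of_pos (by omega)
  have h2 := Int.emod_nonneg n (by norm_num : (95:Int) ≠ 0)
  simp only [h1]; omega

def int_to_char (P_C_int : Int) : String :=
  -- after the while loop: `if P_C_int // 95 < 95: rlist.append(P_C_int % 95)`,
  -- then rlist.reverse(); chr(r+32) makes one-char strings, joined by "".join
  String.ofList (PySem.Chars.join []
    (((if PySem.Int.floordiv (intToCharLoopA P_C_int [] []).1 95 < 95
        then (intToCharLoopA P_C_int [] []).2.2 ++ [PySem.Int.mod (intToCharLoopA P_C_int [] []).1 95]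
        else (intToCharLoopA P_C_int [] []).2.2).reverse).map
      (fun r => [Char.ofNat (r + 32).toNat])))

-- ===== PORT B =====
def intToCharAltChars (n : Int) : List Char :=
  if n < 95 then [Char.ofNat (PySem.Int.mod n 95 + 32).toNat]
  else intToCharAltChars (PySem.Int.floordiv n 95) ++ [Char.ofNat (PySem.Int.mod n 95 + 32).toNat]
termination_by n.toNat
decreasing_by
  have h1 : PySem.Int.floordiv n 95 = n / 95 := PySem.Int.floordiv_eq_ediv_of_pos (by omega)
  have h2 := Int.emod_nonneg n (by norm_num : (95:Int) ≠ 0)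
  simp only [h1]; omega

def int_to_char_alt (P_C_int : Int) : String :=
  String.ofList (intToCharAltChars P_C_int)

-- ===== PRECONDITION & SPEC =====
def Spec_int_to_char (P_C_int : Int) (out : String) : Prop := out = int_to_char_alt P_C_int
instance (P_C_int : Int) (out : String) : Decidable (Spec_int_to_char P_C_int out) := by unfold Spec_int_to_char; infer_instance

-- ===== CLAIM (what is proved, stated in full; the proofs are below) =====
def Claim_equal_int_to_char : Prop := ∀ (P_C_int : Int), Dom_int_to_char P_C_int → Spec_int_to_char P_C_int (int_to_char P_C_int)

-- ===== LEMMAS AND PROOFS =====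

-- accumulator lemma for the while loop, plus "final state < 95" and the digit/char
-- correspondence with B, all by strong induction on n.toNat via an explicit bound k
theorem loopA_main : ∀ (k : Nat) (n : Int), n.toNat ≤ k →
    (∀ q r : List Int, intToCharLoopA n q r =
      ((intToCharLoopA n [] []).1, q ++ (intToCharLoopA n [] []).2.1,
        r ++ (intToCharLoopA n [] []).2.2)) ∧
    (intToCharLoopA n [] []).1 < 95 ∧
    (((intToCharLoopA n [] []).2.2 ++ [PySem.Int.mod (intToCharLoopA n [] []).1 95]).reverse).map
      (fun r => Char.ofNat (r + 32).toNat) = intToCharAltChars n := by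
  intro k
  induction k with
  | zero =>
      intro n hk
      have hlt : n < 95 := by omega
      rw [intToCharLoopA, dif_neg (by omega)] at *
      refine ⟨?_, by simpa using hlt, ?_⟩
      · intro q r; rw [intToCharLoopA, dif_neg (by omega)]; simp
      · rw [intToCharAltChars, if_pos hlt]; simp
  | succ m ih =>
      intro n hk
      by_cases h : n ≥ 95
      · have h1 : PySem.Int.floordiv n 95 = n / 95 := PySem.Int.floordiv_eq_ediv_of_pos (by omega)
        have h2 := Int.mul_ediv_add_emod n 95
        have h3 := Int.emod_nonneg n (by norm_num : (95:Int) ≠ 0)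
        have h4 := Int.emod_lt_of_pos n (by norm_num : (0:Int) < 95)
        have hdec : (PySem.Int.floordiv n 95).toNat ≤ m := by rw [h1]; omega
        obtain ⟨ihacc, ihlt, ihchars⟩ := ih (PySem.Int.floordiv n 95) hdec
        have hstep : ∀ q r : List Int, intToCharLoopA n q r =
            ((intToCharLoopA (PySem.Int.floordiv n 95) [] []).1,
              q ++ ([PySem.Int.floordiv n 95] ++ (intToCharLoopA (PySem.Int.floordiv n 95) [] []).2.1),
              r ++ ([PySem.Int.mod n 95] ++ (intToCharLoopA (PySem.Int.floordiv n 95) [] []).2.2)) := by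
          intro q r
          rw [intToCharLoopA, dif_pos h, ihacc]
          simp
        refine ⟨?_, ?_, ?_⟩
        · intro q r; rw [hstep, hstep]; simp
        · rw [hstep]; exact ihlt
        · rw [hstep]
          rw [intToCharAltChars, if_neg (by omega), ← ihchars]
          simp
      · rw [intToCharLoopA, dif_neg h] at *
        refine ⟨?_, by omega, ?_⟩
        · intro q r; rw [intToCharLoopA, dif_neg h]; simp
        · rw [intToCharAltChars, if_pos (by omega)]; simp

-- the guard `P_C_int // 95 < 95` is always true after the loop
theorem pvGuardTrue (P : Int) (hP : P < 95) : PySem.Int.floordiv P 95 < 95 := by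
  rw [PySem.Int.floordiv_eq_ediv_of_pos (by omega)]
  have h2 := Int.mul_ediv_add_emod P 95
  have h3 := Int.emod_nonneg P (by norm_num : (95:Int) ≠ 0)
  have h4 := Int.emod_lt_of_pos P (by norm_num : (0:Int) < 95)
  omega

theorem int_to_char_eq (n : Int) : int_to_char n = int_to_char_alt n := by
  obtain ⟨-, hlt, hchars⟩ := loopA_main n.toNat n le_rfl
  rw [int_to_char, int_to_char_alt, if_pos (pvGuardTrue _ hlt)]
  have hmap : ∀ (l : List Int), l.map (fun r => [Char.ofNat (r + 32).toNat]) =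
      (l.map (fun r => Char.ofNat (r + 32).toNat)).map (fun c => [c]) := by
    intro l; simp [List.map_map]
  rw [hmap, PySem.Chars.join_nil_singletons, List.map_reverse, ← List.map_reverse, hchars]

-- ===== VERDICT (by name: the statement is the Claim_ definition above) =====
theorem int_to_char_spec : Claim_equal_int_to_char := by
  intro n _
  exact int_to_char_eq n
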